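-- pv_equiv track=rewrite | github.com/Camilo-6/SextoSemestre | IS/Practica1/Script2.py | aux
-- ===== SOURCE A (Python) =====
-- def aux(cadena):
--     tam_recorrido = len(cadena)
--     recorrido = []
--     recorrido.append(0)
--     altura = 0
--     for i in range(1, tam_recorrido + 1):
--         if cadena[i - 1] == "U":
--             altura += 1
--         else:
--             altura -= 1
--         recorrido.append(altura)
--     return recorrido
-- ===== SOURCE B (Python) =====
-- def aux(cadena):
--     # Compute the final height first, then rebuild the profile from the right:
--     # walking the string backwards and undoing each step, collecting heights
--     # back-to-front, and reversing once at the end.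
--     h = sum(1 if c == "U" else -1 for c in cadena)
--     out = [h]
--     for c in reversed(cadena):
--         h -= 1 if c == "U" else -1
--         out.append(h)
--     out.reverse()
--     return out
-- ===== Notes on version B (the rewrite author's own statement) =====
-- stated objective: alternative
-- what changed: Instead of A's forward loop carrying a running height, B computes the final height as a sum of deltas, then walks the string backwards undoing each step to collect the heights back-to-front, reversing once at the end.
import Mathlib
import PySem

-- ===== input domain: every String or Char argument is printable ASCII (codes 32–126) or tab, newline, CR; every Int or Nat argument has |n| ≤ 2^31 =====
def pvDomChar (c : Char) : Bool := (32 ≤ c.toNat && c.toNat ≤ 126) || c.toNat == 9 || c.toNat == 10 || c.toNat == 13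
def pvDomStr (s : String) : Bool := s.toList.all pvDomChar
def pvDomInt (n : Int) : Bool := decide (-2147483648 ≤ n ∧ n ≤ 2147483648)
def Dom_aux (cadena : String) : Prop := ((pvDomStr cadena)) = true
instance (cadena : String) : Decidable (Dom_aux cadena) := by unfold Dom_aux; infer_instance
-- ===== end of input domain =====

-- B replaces A's forward running-height loop by: total height first (sum of deltas), then a
-- backward walk undoing steps, collecting heights back-to-front and reversing once (objective:
-- alternative decomposition, same cost).

-- ===== PORT A =====
-- A's loop walks cadena[i-1] for i = 1..len, i.e. the characters in order, appending the running height.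
def auxLoop : List Char → Int → List Int → List Int
  | [], _, recorrido => recorrido
  | c :: rest, altura, recorrido =>
    let altura' := if c = 'U' then altura + 1 else altura - 1
    auxLoop rest altura' (recorrido ++ [altura'])

def aux (cadena : String) : List Int := auxLoop cadena.toList 0 [0]

-- ===== PORT B =====
-- Source B's backward walk: out.append(h) after h -= delta, over reversed(cadena)
def backLoop : List Char → Int → List Int → List Int
  | [], _, out => out
  | c :: rest, h, out =>
    let h' := h - (if c = 'U' then 1 else -1)
    backLoop rest h' (out ++ [h'])

def aux_alt (cadena : String) : List Int :=
  let h := (cadena.toList.map (fun c => if c = 'U' then (1 : Int) else -1)).sum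
  (backLoop cadena.toList.reverse h [h]).reverse

-- ===== PRECONDITION & SPEC =====
def Spec_aux (cadena : String) (out : List Int) : Prop := out = aux_alt cadena
instance (cadena : String) (out : List Int) : Decidable (Spec_aux cadena out) := by unfold Spec_aux; infer_instance

-- ===== CLAIM (what is proved, stated in full; the proofs are below) =====
def Claim_equal_aux : Prop := ∀ (cadena : String), Dom_aux cadena → Spec_aux cadena (aux cadena)

-- ===== LEMMAS AND PROOFS =====

def delta (c : Char) : Int := if c = 'U' then 1 else -1

def sumD (chars : List Char) : Int := (chars.map delta).sum

-- cons-style reference versions of the two accumulator loops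
def heightsA : List Char → Int → List Int
  | [], _ => []
  | c :: rest, altura =>
    let altura' := if c = 'U' then altura + 1 else altura - 1
    altura' :: heightsA rest altura'

def backs : List Char → Int → List Int
  | [], _ => []
  | c :: rest, h =>
    let h' := h - (if c = 'U' then 1 else -1)
    h' :: backs rest h'

theorem auxLoop_eq (chars : List Char) : ∀ (a : Int) (rec : List Int),
    auxLoop chars a rec = rec ++ heightsA chars a := by
  induction chars with
  | nil => intro a rec; simp [auxLoop, heightsA]
  | cons c rest ih => intro a rec; simp [auxLoop, heightsA, ih]

theorem backLoop_eq (chars : List Char) : ∀ (h : Int) (out : List Int),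
    backLoop chars h out = out ++ backs chars h := by
  induction chars with
  | nil => intro h out; simp [backLoop, backs]
  | cons c rest ih => intro h out; simp [backLoop, backs, ih]

theorem heightsA_append (xs ys : List Char) : ∀ (a : Int),
    heightsA (xs ++ ys) a = heightsA xs a ++ heightsA ys (a + sumD xs) := by
  induction xs with
  | nil => intro a; simp [heightsA, sumD]
  | cons c rest ih =>
    intro a
    by_cases h : c = 'U' <;>
      simp [heightsA, h, ih, sumD, delta] <;>
      ring_nf

theorem back_key (chars : List Char) : ∀ (a : Int),
    (backs chars.reverse (a + sumD chars)).reverse ++ [a + sumD chars]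
      = a :: heightsA chars a := by
  induction chars using List.reverseRecOn with
  | nil => intro a; simp [backs, sumD, heightsA]
  | append_singleton xs c ih =>
    intro a
    have hs : sumD (xs ++ [c]) = sumD xs + delta c := by simp [sumD]
    rw [hs, List.reverse_append]
    simp only [List.reverse_singleton, List.singleton_append]
    have hstep : a + (sumD xs + delta c) - (if c = 'U' then 1 else -1) = a + sumD xs := by
      simp [delta]; by_cases h : c = 'U' <;> simp [h] <;> ring
    simp only [backs, hstep]
    rw [List.reverse_cons, List.append_assoc, List.singleton_append]
    rw [show ((a + sumD xs) :: [a + (sumD xs + delta c)])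
        = [a + sumD xs] ++ [a + (sumD xs + delta c)] from rfl]
    rw [← List.append_assoc, ih a]
    rw [heightsA_append]
    by_cases h : c = 'U' <;> simp [heightsA, h, delta] <;> ring_nf

-- ===== VERDICT (by name: the statement is the Claim_ definition above) =====
theorem aux_spec : Claim_equal_aux := by
  intro cadena _
  unfold Spec_aux aux
  have halt : aux_alt cadena
      = (backLoop cadena.toList.reverse
          ((cadena.toList.map (fun c => if c = 'U' then (1 : Int) else -1)).sum)
          [(cadena.toList.map (fun c => if c = 'U' then (1 : Int) else -1)).sum]).reverse := rfl
  have hsum : (cadena.toList.map (fun c => if c = 'U' then (1 : Int) else -1)).sum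
      = (0 : Int) + sumD cadena.toList := by rw [Int.zero_add]; rfl
  rw [auxLoop_eq, halt, hsum, backLoop_eq, List.singleton_append, List.reverse_append]
  have := back_key cadena.toList 0
  simpa using this.symm
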